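-- pv_equiv track=rewrite | github.com/aihearticu/azure-ai-learning-hub | 06-generative-ai/03b-Multi-Agent-Solution/src/ticket_triage_agents.py | _parse_priority_result
-- ===== SOURCE A (Python) =====
-- from typing import Dict, List, Tuple, Optional
--
-- def _parse_priority_result(analysis: str) -> Tuple[str, int, str]:
--     """Parse priority agent results."""
--     lines = analysis.strip().split('\n')
--     priority = "P3"  # Default
--     score = 5  # Default
--     reasoning = ""
--
--     for line in lines:
--         if line.startswith("Priority:"):
--             priority = line.split(":", 1)[1].strip()
--         elif line.startswith("Score:"):
--             try:
--                 score = int(line.split(":", 1)[1].strip())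
--             except:
--                 score = 5
--         elif line.startswith("Reasoning:"):
--             reasoning = line.split(":", 1)[1].strip()
--
--     return priority, score, reasoning
-- ===== SOURCE B (Python) =====
-- def _parse_priority_result(analysis):
--     """Parse priority agent results (dict-based: index all 'key: value' lines once, then extract)."""
--     fields = {}
--     for line in analysis.strip().split('\n'):
--         if ':' in line:
--             key, _, value = line.partition(':')
--             fields[key] = value.strip()
--     priority = fields.get('Priority', 'P3')
--     reasoning = fields.get('Reasoning', '')
--     try:
--         score = int(fields.get('Score', '5'))
--     except ValueError:
--         score = 5
--     return priority, score, reasoning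
-- ===== Notes on version B (the rewrite author's own statement) =====
-- stated objective: alternative
-- what changed: B replaces A's per-line three-branch state machine by a generic pass that indexes every colon-bearing line into a dict keyed by the text before the first colon (last occurrence wins) and then extracts Priority/Score/Reasoning independently with defaults.
import Mathlib
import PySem

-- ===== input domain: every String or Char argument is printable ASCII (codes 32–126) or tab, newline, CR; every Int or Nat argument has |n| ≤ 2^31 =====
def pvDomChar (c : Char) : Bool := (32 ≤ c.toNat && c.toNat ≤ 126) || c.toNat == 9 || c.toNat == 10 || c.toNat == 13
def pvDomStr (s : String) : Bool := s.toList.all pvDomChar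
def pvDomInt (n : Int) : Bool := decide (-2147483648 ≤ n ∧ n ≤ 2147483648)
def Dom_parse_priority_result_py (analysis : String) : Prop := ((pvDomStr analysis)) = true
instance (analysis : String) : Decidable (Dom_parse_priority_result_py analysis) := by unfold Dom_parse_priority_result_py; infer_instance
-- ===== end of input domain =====

-- B indexes every colon-bearing line into a dict once (key = text before the first colon) and extracts the three fields independently
-- (alternative decomposition, same cost); proved equal to A's branch-per-key fold on all inputs.

-- ===== PORT A =====
-- line.split(":", 1)[1].strip()  (only reached when the line contains ':')
def pvValA (line : String) : String :=
  PySem.Str.strip (((PySem.Str.splitMax? line ":" 1).getD []).getD 1 "")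

def pvStepA (st : String × Int × String) (line : String) : String × Int × String :=
  if PySem.Str.startswith line "Priority:" then
    (pvValA line, st.2.1, st.2.2)
  else if PySem.Str.startswith line "Score:" then
    (st.1,
     (match PySem.Int.ofStr? (pvValA line) with
      | some n => n
      | none => 5),
     st.2.2)
  else if PySem.Str.startswith line "Reasoning:" then
    (st.1, st.2.1, pvValA line)
  else st

def parse_priority_result_py (analysis : String) : String × Int × String :=
  let lines := (PySem.Str.split? (PySem.Str.strip analysis) "\n").getD []
  lines.foldl pvStepA ("P3", 5, "")

-- ===== PORT B =====
-- hand port of line.partition(':') for the single-character separator ':' (exact there):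
-- (text before the first ':', text after it)
def pvPartition (cs : List Char) : List Char × List Char :=
  (cs.takeWhile (· ≠ ':'), (cs.dropWhile (· ≠ ':')).drop 1)

def pvStepB (d : PySem.Dict String String) (line : String) : PySem.Dict String String :=
  if PySem.Str.isIn ":" line then
    let kv := pvPartition line.toList
    d.insert (String.ofList kv.1) (PySem.Str.strip (String.ofList kv.2))
  else d

-- int(s) with the fallback to 5 on ValueError
def pvScoreB (s : String) : Int :=
  match PySem.Int.ofStr? s with
  | some n => n
  | none => 5

def pvExtract (d : PySem.Dict String String) : String × Int × String :=
  (d.getD "Priority" "P3", pvScoreB (d.getD "Score" "5"), d.getD "Reasoning" "")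

def parse_priority_result_py_alt (analysis : String) : String × Int × String :=
  let lines := (PySem.Str.split? (PySem.Str.strip analysis) "\n").getD []
  pvExtract (lines.foldl pvStepB PySem.Dict.empty)

-- ===== PRECONDITION & SPEC =====
def Spec_parse_priority_result_py (analysis : String) (out : String × Int × String) : Prop := out = parse_priority_result_py_alt analysis
instance (analysis : String) (out : String × Int × String) : Decidable (Spec_parse_priority_result_py analysis out) := by unfold Spec_parse_priority_result_py; infer_instance

-- ===== CLAIM (what is proved, stated in full; the proofs are below) =====
def Claim_equal_parse_priority_result_py : Prop := ∀ (analysis : String), Dom_parse_priority_result_py analysis → Spec_parse_priority_result_py analysis (parse_priority_result_py analysis)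

-- ===== LEMMAS AND PROOFS =====

-- span of a char list at its first ':'
lemma pv_span_colon (cs : List Char) (h : ':' ∈ cs) :
    cs = cs.takeWhile (· ≠ ':') ++ ':' :: (cs.dropWhile (· ≠ ':')).drop 1 ∧
      ':' ∉ cs.takeWhile (· ≠ ':') := by
  induction cs with
  | nil => cases h
  | cons c rest ih =>
    by_cases hc : c = ':'
    · subst hc
      rw [List.takeWhile_cons_of_neg (by simp), List.dropWhile_cons_of_neg (by simp)]
      simp
    · have hr : ':' ∈ rest := by
        cases List.mem_cons.mp h with
        | inl h' => exact absurd h'.symm hc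
        | inr h' => exact h'
      obtain ⟨h1, h2⟩ := ih hr
      rw [List.takeWhile_cons_of_pos (by simp [hc]), List.dropWhile_cons_of_pos (by simp [hc])]
      constructor
      · conv_lhs => rw [h1]
        simp
      · intro hmem
        cases List.mem_cons.mp hmem with
        | inl h' => exact hc h'.symm
        | inr h' => exact h2 h'

lemma pv_tw_key (key rest : List Char) (hk : ':' ∉ key) :
    (key ++ ':' :: rest).takeWhile (· ≠ ':') = key ∧
      (key ++ ':' :: rest).dropWhile (· ≠ ':') = ':' :: rest := by
  induction key with
  | nil =>
    rw [List.nil_append, List.takeWhile_cons_of_neg (by simp),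
        List.dropWhile_cons_of_neg (by simp)]
    exact ⟨rfl, rfl⟩
  | cons c cs ih =>
    have hc : c ≠ ':' := fun e => hk (by simp [e])
    obtain ⟨ih1, ih2⟩ := ih (fun m => hk (by simp [m]))
    rw [List.cons_append, List.takeWhile_cons_of_pos (by simp [hc]),
        List.dropWhile_cons_of_pos (by simp [hc]), ih1, ih2]
    exact ⟨rfl, rfl⟩

lemma pv_prefix_iff (key cs : List Char) (hk : ':' ∉ key) :
    (key ++ [':']) <+: cs ↔ (':' ∈ cs ∧ cs.takeWhile (· ≠ ':') = key) := by
  constructor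
  · rintro ⟨rest, hrest⟩
    have hcs : cs = key ++ ':' :: rest := by
      rw [← hrest]; simp
    subst hcs
    refine ⟨by simp, (pv_tw_key key rest hk).1⟩
  · rintro ⟨hmem, htw⟩
    obtain ⟨hspan, -⟩ := pv_span_colon cs hmem
    refine ⟨(cs.dropWhile (· ≠ ':')).drop 1, ?_⟩
    conv_rhs => rw [hspan, htw]
    simp

lemma pv_isIn_colon (line : String) :
    PySem.Str.isIn ":" line = true ↔ ':' ∈ line.toList := by
  have : (":" : String).toList = [':'] := by decide
  rw [show PySem.Str.isIn ":" line = PySem.Chars.isIn (":" : String).toList line.toList from rfl,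
      this, PySem.Chars.isIn_iff_infix]
  constructor
  · intro h; exact h.subset (by simp)
  · intro h
    obtain ⟨s, t, hst⟩ := List.append_of_mem h
    exact ⟨s, t, by rw [hst]; simp⟩

lemma pv_startswith_iff (line : String) (p key : String)
    (hp : p.toList = key.toList ++ [':']) (hk : ':' ∉ key.toList) :
    PySem.Str.startswith line p = true ↔
      (':' ∈ line.toList ∧ line.toList.takeWhile (· ≠ ':') = key.toList) := by
  rw [show PySem.Str.startswith line p = PySem.Chars.startswith line.toList p.toList from rfl,
      PySem.Chars.startswith_iff, hp]
  exact pv_prefix_iff key.toList line.toList hk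

-- splitOnMax.go with maxsplit exhausted returns the rest as the final piece
lemma pv_go_zero (sep : List Char) (fuel : Nat) (l cur : List Char) (acc : List (List Char)) :
    PySem.Chars.splitOnMax.go sep fuel 0 l cur acc = ((cur.reverse ++ l) :: acc).reverse := by
  cases fuel with
  | zero => rfl
  | succ f => cases l with
    | nil => simp [PySem.Chars.splitOnMax.go]
    | cons c rest => simp [PySem.Chars.splitOnMax.go]

lemma pv_go_one (fuel : Nat) (cs cur : List Char) (acc : List (List Char))
    (hf : cs.length < fuel) :
    PySem.Chars.splitOnMax.go [':'] fuel 1 cs cur acc =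
      if ':' ∈ cs
      then acc.reverse ++ [cur.reverse ++ cs.takeWhile (· ≠ ':'), (cs.dropWhile (· ≠ ':')).drop 1]
      else acc.reverse ++ [cur.reverse ++ cs] := by
  induction cs generalizing fuel cur acc with
  | nil =>
    cases fuel with
    | zero => omega
    | succ f => simp [PySem.Chars.splitOnMax.go]
  | cons c rest ih =>
    cases fuel with
    | zero => omega
    | succ f =>
      by_cases hc : c = ':'
      · subst hc
        simp only [PySem.Chars.splitOnMax.go]
        have hpre : ([':'] : List Char).isPrefixOf (':' :: rest) = true := by
          simp [List.isPrefixOf]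
        rw [if_neg (by omega : ¬ (1 : Nat) = 0)]
        simp only [hpre]
        rw [pv_go_zero]
        rw [List.takeWhile_cons_of_neg (by simp), List.dropWhile_cons_of_neg (by simp)]
        simp
      · simp only [PySem.Chars.splitOnMax.go]
        have hpre : ([':'] : List Char).isPrefixOf (c :: rest) = false := by
          simp [List.isPrefixOf]; exact fun e => hc e.symm
        have hrec := ih f (c :: cur) acc (by simpa using Nat.lt_of_succ_lt_succ hf)
        rw [if_neg (by omega : ¬ (1 : Nat) = 0)]
        simp only [hpre, Bool.false_eq_true, if_false]
        rw [hrec]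
        rw [List.takeWhile_cons_of_pos (by simp [hc]), List.dropWhile_cons_of_pos (by simp [hc])]
        by_cases hm : ':' ∈ rest
        · simp [hm, Ne.symm hc]
        · simp [hm, Ne.symm hc]

lemma pv_splitMax_colon (line : String) :
    ((PySem.Str.splitMax? line ":" 1).getD []) =
      if ':' ∈ line.toList
      then [String.ofList (line.toList.takeWhile (· ≠ ':')),
            String.ofList ((line.toList.dropWhile (· ≠ ':')).drop 1)]
      else [String.ofList line.toList] := by
  have hsep : (":" : String).toList = [':'] := by decide
  rw [show PySem.Str.splitMax? line ":" 1 =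
        Option.map (fun x => List.map String.ofList x)
          (PySem.Chars.splitMax? line.toList (":" : String).toList 1) from rfl, hsep]
  rw [show PySem.Chars.splitMax? line.toList [':'] 1 =
        some (PySem.Chars.splitOnMax line.toList [':'] 1) from rfl]
  rw [show PySem.Chars.splitOnMax line.toList [':'] 1 =
        PySem.Chars.splitOnMax.go [':'] (line.toList.length + 1) 1 line.toList [] [] from rfl]
  rw [pv_go_one (line.toList.length + 1) line.toList [] [] (by omega)]
  by_cases hm : ':' ∈ line.toList <;> simp [hm]

lemma pv_valA (line : String) (h : ':' ∈ line.toList) :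
    pvValA line = PySem.Str.strip (String.ofList ((line.toList.dropWhile (· ≠ ':')).drop 1)) := by
  unfold pvValA
  rw [pv_splitMax_colon line, if_pos h]
  rfl

-- the two step functions commute through pvExtract
lemma pv_step_comm (d : PySem.Dict String String) (line : String) :
    pvStepA (pvExtract d) line = pvExtract (pvStepB d line) := by
  have hP := pv_startswith_iff line "Priority:" "Priority" (by decide) (by decide)
  have hS := pv_startswith_iff line "Score:" "Score" (by decide) (by decide)
  have hR := pv_startswith_iff line "Reasoning:" "Reasoning" (by decide) (by decide)
  by_cases hm : ':' ∈ line.toList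
  · have hin : PySem.Str.isIn ":" line = true := (pv_isIn_colon line).mpr hm
    have hval := pv_valA line hm
    by_cases hkP : line.toList.takeWhile (· ≠ ':') = ("Priority" : String).toList
    · have : PySem.Str.startswith line "Priority:" = true := hP.mpr ⟨hm, hkP⟩
      simp only [pvStepA, pvStepB, this, if_pos, hin, pvPartition, hkP, pvExtract]
      rw [show String.ofList ("Priority" : String).toList = "Priority" by decide]
      simp [PySem.Dict.getD_insert, hval]
    · by_cases hkS : line.toList.takeWhile (· ≠ ':') = ("Score" : String).toList
      · have h1 : PySem.Str.startswith line "Priority:" = false := by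
          rw [Bool.eq_false_iff]; intro h; exact hkP (hP.mp h).2
        have h2 : PySem.Str.startswith line "Score:" = true := hS.mpr ⟨hm, hkS⟩
        simp only [pvStepA, pvStepB, h1, h2, hin, if_true, Bool.false_eq_true, if_false,
          pvPartition, hkS, pvExtract]
        rw [show String.ofList ("Score" : String).toList = "Score" by decide]
        simp [PySem.Dict.getD_insert, hval, pvScoreB]
      · by_cases hkR : line.toList.takeWhile (· ≠ ':') = ("Reasoning" : String).toList
        · have h1 : PySem.Str.startswith line "Priority:" = false := by
            rw [Bool.eq_false_iff]; intro h; exact hkP (hP.mp h).2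
          have h2 : PySem.Str.startswith line "Score:" = false := by
            rw [Bool.eq_false_iff]; intro h; exact hkS (hS.mp h).2
          have h3 : PySem.Str.startswith line "Reasoning:" = true := hR.mpr ⟨hm, hkR⟩
          simp only [pvStepA, pvStepB, h1, h2, h3, hin, if_true, Bool.false_eq_true, if_false,
            pvPartition, hkR, pvExtract]
          rw [show String.ofList ("Reasoning" : String).toList = "Reasoning" by decide]
          simp [PySem.Dict.getD_insert, hval]
        · have h1 : PySem.Str.startswith line "Priority:" = false := by
            rw [Bool.eq_false_iff]; intro h; exact hkP (hP.mp h).2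
          have h2 : PySem.Str.startswith line "Score:" = false := by
            rw [Bool.eq_false_iff]; intro h; exact hkS (hS.mp h).2
          have h3 : PySem.Str.startswith line "Reasoning:" = false := by
            rw [Bool.eq_false_iff]; intro h; exact hkR (hR.mp h).2
          have hkey : ∀ k : String, k.toList ≠ line.toList.takeWhile (· ≠ ':') →
              (k ≠ String.ofList (line.toList.takeWhile (· ≠ ':'))) := by
            intro k hne he
            exact hne (by rw [he]; simp)
          simp only [pvStepA, pvStepB, h1, h2, h3, hin, if_true, Bool.false_eq_true, if_false,
            pvPartition, pvExtract]
          rw [PySem.Dict.getD_insert, PySem.Dict.getD_insert, PySem.Dict.getD_insert]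
          rw [if_neg (hkey "Priority" (fun e => hkP e.symm)),
              if_neg (hkey "Score" (fun e => hkS e.symm)),
              if_neg (hkey "Reasoning" (fun e => hkR e.symm))]
  · have hin : PySem.Str.isIn ":" line = false := by
      rw [Bool.eq_false_iff]; intro h; exact hm ((pv_isIn_colon line).mp h)
    have h1 : PySem.Str.startswith line "Priority:" = false := by
      rw [Bool.eq_false_iff]; intro h; exact hm (hP.mp h).1
    have h2 : PySem.Str.startswith line "Score:" = false := by
      rw [Bool.eq_false_iff]; intro h; exact hm (hS.mp h).1
    have h3 : PySem.Str.startswith line "Reasoning:" = false := by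
      rw [Bool.eq_false_iff]; intro h; exact hm (hR.mp h).1
    simp only [pvStepA, pvStepB, h1, h2, h3, hin, Bool.false_eq_true, if_false]

lemma pv_fold_comm (lines : List String) (d : PySem.Dict String String) :
    lines.foldl pvStepA (pvExtract d) = pvExtract (lines.foldl pvStepB d) := by
  induction lines generalizing d with
  | nil => rfl
  | cons l rest ih =>
    simp only [List.foldl_cons, pv_step_comm d l]
    exact ih (pvStepB d l)

-- ===== VERDICT (by name: the statement is the Claim_ definition above) =====
theorem parse_priority_result_py_spec : Claim_equal_parse_priority_result_py := by
  intro analysis _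
  unfold Spec_parse_priority_result_py parse_priority_result_py parse_priority_result_py_alt
  have : pvExtract PySem.Dict.empty = ("P3", 5, "") := by decide
  rw [← this, pv_fold_comm]
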